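-- pv_equiv track=rewrite | github.com/GheorgheLuca1/SAT-Helper | sat_solver.py | dpll_iterative
-- ===== SOURCE A (Python) =====
-- def unit_literal(clauses):
--     return next((cl[0] for cl in clauses if len(cl) == 1), None)
--
-- def pure_literal(clause_list):
--     lits = {lit for cl in clause_list for lit in cl}
--     for lit in lits:
--         if -lit not in lits:
--             return lit
--     return None
--
-- def propagate(lit, clauses):
--     new = []
--     for cl in clauses:
--         if lit in cl:
--             continue
--         if -lit in cl:
--             cl = tuple(l for l in cl if l != -lit)
--             if not cl:
--                 return None
--         new.append(cl)
--     return new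
--
-- def dpll_iterative(clauses):
--     stack = [(clauses, {})]
--     while stack:
--         formula, asn = stack.pop()
--         changed = True
--         while changed:
--             changed = False
--             # unit
--             while (lit := unit_literal(formula)) is not None:
--                 asn[abs(lit)] = lit > 0
--                 formula = propagate(lit, formula)
--                 if formula is None:
--                     break
--                 changed = True
--             if formula is None:
--                 break
--             lit = pure_literal(formula)
--             if lit is not None:
--                 asn[abs(lit)] = lit > 0
--                 formula = [cl for cl in formula if lit not in cl]
--                 changed = True
--         if formula is None:
--             continue
--         if not formula:
--             return True
--         lit = formula[0][0]
--         stack.append((propagate(-lit, formula), {**asn, abs(lit): lit < 0}))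
--         stack.append((propagate(lit, formula),  {**asn, abs(lit): lit > 0}))
--     return False
-- ===== SOURCE B (Python) =====
-- def unit_literal(clauses):
--     return next((cl[0] for cl in clauses if len(cl) == 1), None)
--
-- def pure_literal(clause_list):
--     lits = {lit for cl in clause_list for lit in cl}
--     for lit in lits:
--         if -lit not in lits:
--             return lit
--     return None
--
-- def propagate(lit, clauses):
--     new = []
--     for cl in clauses:
--         if lit in cl:
--             continue
--         if -lit in cl:
--             cl = tuple(l for l in cl if l != -lit)
--             if not cl:
--                 return None
--         new.append(cl)
--     return new
--
-- def simplify(formula):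
--     # unit propagation / pure-literal elimination to a fixpoint, recursion-free
--     while True:
--         lit = unit_literal(formula)
--         if lit is not None:
--             formula = propagate(lit, formula)
--             if formula is None:
--                 return None
--             continue
--         lit = pure_literal(formula)
--         if lit is not None:
--             formula = [cl for cl in formula if lit not in cl]
--             continue
--         return formula
--
-- def dpll(formula):
--     if formula is None:
--         return False
--     formula = simplify(formula)
--     if formula is None:
--         return False
--     if not formula:
--         return True
--     lit = formula[0][0]
--     return dpll(propagate(lit, formula)) or dpll(propagate(-lit, formula))
--
-- def dpll_iterative(clauses):
--     return dpll(clauses)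
-- ===== Notes on version B (the rewrite author's own statement) =====
-- stated objective: simpler
-- what changed: Replaces A's explicit-stack while-loop driver (pop/push of (formula, assignment) pairs with a changed-flag fixpoint loop) by a direct recursive DPLL: a recursion-free simplify helper to the unit/pure fixpoint and dpll(f) = dpll(propagate(lit,f)) or dpll(propagate(-lit,f)), dropping the dead assignment dict.
-- outside the precondition, e.g. on dpll_iterative([()]): A raises IndexError, B raises IndexError; on dpll_iterative([(1, 1), (-1, -1)]): A raises TypeError, B returns False; on dpll_iterative([(), (1,), (-1,)]): A returns False, B returns False
import Mathlib
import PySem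

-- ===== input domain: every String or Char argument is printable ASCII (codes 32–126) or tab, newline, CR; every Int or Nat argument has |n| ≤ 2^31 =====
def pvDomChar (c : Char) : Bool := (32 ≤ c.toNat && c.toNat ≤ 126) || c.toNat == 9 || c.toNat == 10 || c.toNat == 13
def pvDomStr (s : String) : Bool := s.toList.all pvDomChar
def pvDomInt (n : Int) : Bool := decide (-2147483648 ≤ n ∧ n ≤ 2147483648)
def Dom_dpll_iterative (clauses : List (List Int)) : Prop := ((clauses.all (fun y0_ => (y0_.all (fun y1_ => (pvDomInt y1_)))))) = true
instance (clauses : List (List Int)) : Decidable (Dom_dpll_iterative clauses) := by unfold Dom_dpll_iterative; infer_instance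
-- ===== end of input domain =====

-- B replaces A's explicit-stack driver by a direct recursive DPLL (simplify to a fixpoint,
-- then branch with `or`), dropping the dead assignment dict; same return value on Pre_.
-- A mutates only its local dict, so no caller-observable side effects are at stake.

-- number of distinct variables of a formula (used only to compute sufficient fuel bounds)
def pvVarNum (f : List (List Int)) : Nat := ((f.flatMap id).map (fun x => |x|)).toFinset.card

-- ===== PORT A ===== (helpers shared with B, as in the Python module)
def unitLiteral (clauses : List (List Int)) : Option Int :=
  (clauses.find? (fun cl => cl.length == 1)).bind (fun cl => cl.head?)

-- Python iterates the set `lits` in hash order; the port iterates it in first-insertion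
-- order (PySem.Set).  Only the returned Bool of the entry point is claimed, and the
-- differential test compares just that value.
def pureLiteral (clauseList : List (List Int)) : Option Int :=
  let lits : PySem.Set Int := PySem.Set.ofList (clauseList.flatMap id)
  lits.find? (fun l => decide ((-l) ∉ lits))

def propagate (lit : Int) (clauses : List (List Int)) : Option (List (List Int)) :=
  match clauses with
  | [] => some []
  | cl :: rest =>
    if lit ∈ cl then propagate lit rest
    else if -lit ∈ cl then
      let cl' := cl.filter (fun l => l != -lit)
      if cl' = [] then none
      else (propagate lit rest).map (fun new => cl' :: new)
    else (propagate lit rest).map (fun new => cl :: new)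

-- the inner  while (lit := unit_literal(formula)) is not None:  loop of A
-- (the Nat argument is fuel making the loop total; pvVarNum f + 1 is proved sufficient below)
def unitLoopF : Nat → List (List Int) → PySem.Dict Int Bool → Bool →
    Option (List (List Int)) × PySem.Dict Int Bool × Bool
  | 0, f, asn, changed => (some f, asn, changed)
  | n + 1, f, asn, changed =>
    match unitLiteral f with
    | none => (some f, asn, changed)
    | some lit =>
      let asn' := asn.insert |lit| (decide (0 < lit))
      match propagate lit f with
      | none => (none, asn', changed)
      | some g => unitLoopF n g asn' true

-- the  while changed:  loop of A (changed flag explicit; fueled, bound proved sufficient below)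
def iterChangedF : Nat → Bool → List (List Int) → PySem.Dict Int Bool →
    Option (List (List Int)) × PySem.Dict Int Bool
  | 0, _, f, asn => (some f, asn)
  | n + 1, changed, f, asn =>
    if changed then
      match unitLoopF (pvVarNum f + 1) f asn false with
      | (none, asn', _) => (none, asn')
      | (some f', asn', uc) =>
        match pureLiteral f' with
        | some lit =>
          iterChangedF n true (f'.filter (fun cl => decide (lit ∉ cl)))
            (asn'.insert |lit| (decide (0 < lit)))
        | none => iterChangedF n uc f' asn'
    else (some f, asn)

-- A's driver:  stack = [(clauses, {})];  while stack: ...  (fueled DFS; bound proved sufficient below)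
-- The two marked branches are where the Python raises (TypeError on a popped None formula /
-- IndexError on formula[0][0] of an empty clause); both are unreachable on Pre_; the port skips.
def aLoopF : Nat → List (Option (List (List Int)) × PySem.Dict Int Bool) → Bool
  | 0, _ => false
  | _ + 1, [] => false
  | n + 1, (fOpt, asn) :: rest =>
    match fOpt with
    | none => aLoopF n rest  -- Python: TypeError (unit_literal(None)); outside Pre_
    | some f =>
      match iterChangedF (2 * pvVarNum f + 2) true f asn with
      | (none, _) => aLoopF n rest
      | (some f', asn') =>
        match f' with
        | [] => true
        | [] :: _ => aLoopF n rest  -- Python: IndexError (formula[0][0]); outside Pre_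
        | (lit :: _) :: _ =>
          aLoopF n ((propagate lit f', asn'.insert |lit| (decide (0 < lit))) ::
                    (propagate (-lit) f', asn'.insert |lit| (decide (lit < 0))) :: rest)

def dpll_iterative (clauses : List (List Int)) : Bool :=
  aLoopF (3 ^ (pvVarNum clauses + 1)) [(some clauses, PySem.Dict.empty)]

-- ===== PORT B =====
-- simplify: unit propagation / pure-literal elimination to a fixpoint (fueled; bound proved below)
def simplifyBF : Nat → List (List Int) → Option (List (List Int))
  | 0, f => some f
  | n + 1, f =>
    match unitLiteral f with
    | some lit =>
      match propagate lit f with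
      | none => none
      | some g => simplifyBF n g
    | none =>
      match pureLiteral f with
      | some lit => simplifyBF n (f.filter (fun cl => decide (lit ∉ cl)))
      | none => some f

-- B's recursive dpll (fuel = recursion depth bound, proved sufficient below)
def dpllBF : Nat → Option (List (List Int)) → Bool
  | 0, _ => false
  | n + 1, fOpt =>
    match fOpt with
    | none => false
    | some f =>
      match simplifyBF (pvVarNum f + 1) f with
      | none => false
      | some [] => true
      | some ([] :: _) => false  -- Python: IndexError (formula[0][0]); outside Pre_
      | some ((lit :: cl) :: rest) =>
        dpllBF n (propagate lit ((lit :: cl) :: rest)) ||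
          dpllBF n (propagate (-lit) ((lit :: cl) :: rest))

def dpll_iterative_alt (clauses : List (List Int)) : Bool :=
  dpllBF (pvVarNum clauses + 1) (some clauses)

-- ===== PRECONDITION & SPEC =====
-- Pre_ excludes formulas with an empty clause or a clause with duplicated literals: on those,
-- depending on the search path, Python A raises (IndexError on formula[0][0] of an empty clause,
-- or TypeError after a branch propagation returns None) or returns an accidental value.
def Pre_dpll_iterative (clauses : List (List Int)) : Prop :=
  ∀ cl ∈ clauses, cl ≠ [] ∧ cl.Nodup
instance (clauses : List (List Int)) : Decidable (Pre_dpll_iterative clauses) := by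
  unfold Pre_dpll_iterative; infer_instance

def pvWitness_dpll_iterative : List (List Int) := [[1, -2], [2, 3]]

def Spec_dpll_iterative (clauses : List (List Int)) (out : Bool) : Prop := out = dpll_iterative_alt clauses
instance (clauses : List (List Int)) (out : Bool) : Decidable (Spec_dpll_iterative clauses out) := by unfold Spec_dpll_iterative; infer_instance

-- ===== CLAIM (what is proved, stated in full; the proofs are below) =====
def Claim_equal_dpll_iterative : Prop := ∀ (clauses : List (List Int)), Dom_dpll_iterative clauses → Pre_dpll_iterative clauses → Spec_dpll_iterative clauses (dpll_iterative clauses)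

-- ===== LEMMAS AND PROOFS =====

theorem pvVarNum_lt (g f : List (List Int)) (a : Int)
    (hsub : ∀ x ∈ g.flatMap id, x ∈ f.flatMap id ∧ |x| ≠ a)
    (hmem : ∃ y ∈ f.flatMap id, |y| = a) : pvVarNum g < pvVarNum f := by
  apply Finset.card_lt_card
  constructor
  · intro v hv
    simp only [List.mem_toFinset, List.mem_map] at hv ⊢
    obtain ⟨x, hx, rfl⟩ := hv
    exact ⟨x, (hsub x hx).1, rfl⟩
  · intro hcon
    obtain ⟨y, hy, rfl⟩ := hmem
    have : |y| ∈ ((g.flatMap id).map (fun x => |x|)).toFinset := by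
      apply hcon
      simp only [List.mem_toFinset, List.mem_map]
      exact ⟨y, hy, rfl⟩
    simp only [List.mem_toFinset, List.mem_map] at this
    obtain ⟨x, hx, hxa⟩ := this
    exact (hsub x hx).2 hxa

theorem pvPropagate_sub (lit : Int) (f g : List (List Int)) (h : propagate lit f = some g) :
    ∀ x ∈ g.flatMap id, x ∈ f.flatMap id ∧ x ≠ lit ∧ x ≠ -lit := by
  induction f generalizing g with
  | nil =>
    rw [propagate] at h
    cases h
    simp
  | cons cl rest ih =>
    rw [propagate] at h
    by_cases h1 : lit ∈ cl
    · rw [if_pos h1] at h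
      intro x hx
      obtain ⟨ha, hb, hc⟩ := ih g h x hx
      refine ⟨?_, hb, hc⟩
      simp only [List.flatMap_cons, List.mem_append, id] at ha ⊢
      exact Or.inr ha
    · rw [if_neg h1] at h
      by_cases h2 : -lit ∈ cl
      · rw [if_pos h2] at h
        by_cases h3 : cl.filter (fun l => l != -lit) = []
        · simp only [h3, if_pos] at h
          cases h
        · rw [if_neg h3] at h
          obtain ⟨g', hg', rfl⟩ := Option.map_eq_some_iff.mp h
          intro x hx
          simp only [List.flatMap_cons, List.mem_append, id] at hx
          rcases hx with hx | hx
          · rw [List.mem_filter] at hx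
            obtain ⟨hxcl, hxne⟩ := hx
            refine ⟨?_, fun hc => h1 (hc ▸ hxcl), by simpa using hxne⟩
            simp only [List.flatMap_cons, List.mem_append, id]
            exact Or.inl hxcl
          · obtain ⟨ha, hb, hc⟩ := ih g' hg' x hx
            refine ⟨?_, hb, hc⟩
            simp only [List.flatMap_cons, List.mem_append, id] at ha ⊢
            exact Or.inr ha
      · rw [if_neg h2] at h
        obtain ⟨g', hg', rfl⟩ := Option.map_eq_some_iff.mp h
        intro x hx
        simp only [List.flatMap_cons, List.mem_append, id] at hx
        rcases hx with hx | hx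
        · refine ⟨?_, fun hc => h1 (hc ▸ hx), fun hc => h2 (hc ▸ hx)⟩
          simp only [List.flatMap_cons, List.mem_append, id]
          exact Or.inl hx
        · obtain ⟨ha, hb, hc⟩ := ih g' hg' x hx
          refine ⟨?_, hb, hc⟩
          simp only [List.flatMap_cons, List.mem_append, id] at ha ⊢
          exact Or.inr ha

theorem pvUnit_mem (f : List (List Int)) (lit : Int) (h : unitLiteral f = some lit) :
    lit ∈ f.flatMap id := by
  unfold unitLiteral at h
  obtain ⟨cl, hfind, hhead⟩ := Option.bind_eq_some_iff.mp h
  have hcl : cl ∈ f := List.mem_of_find?_eq_some hfind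
  have hlit : lit ∈ cl := by
    cases cl with
    | nil => simp at hhead
    | cons a t => simp only [List.head?_cons, Option.some.injEq] at hhead; exact hhead ▸ List.mem_cons_self ..
  simp only [List.mem_flatMap, id]
  exact ⟨cl, hcl, hlit⟩

theorem pvPure_mem (f : List (List Int)) (lit : Int) (h : pureLiteral f = some lit) :
    lit ∈ f.flatMap id ∧ (-lit) ∉ f.flatMap id := by
  unfold pureLiteral at h
  have hmem : lit ∈ PySem.Set.ofList (f.flatMap id) := List.mem_of_find?_eq_some h
  have hp := List.find?_some h
  rw [decide_eq_true_eq] at hp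
  constructor
  · exact (PySem.Set.mem_ofList ..).mp hmem
  · intro hc
    exact hp ((PySem.Set.mem_ofList ..).mpr hc)

theorem pvVarNum_propagate_lt (lit : Int) (f g : List (List Int)) (h : propagate lit f = some g)
    (hm : lit ∈ f.flatMap id ∨ -lit ∈ f.flatMap id) : pvVarNum g < pvVarNum f := by
  apply pvVarNum_lt g f |lit|
  · intro x hx
    obtain ⟨h1, h2, h3⟩ := pvPropagate_sub lit f g h x hx
    refine ⟨h1, fun hc => ?_⟩
    rcases abs_eq_abs.mp hc with rfl | rfl
    · exact h2 rfl
    · exact h3 rfl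
  · rcases hm with hm | hm
    · exact ⟨lit, hm, rfl⟩
    · exact ⟨-lit, hm, abs_neg lit⟩

theorem pvVarNum_pureFilter_lt (f : List (List Int)) (lit : Int) (h : pureLiteral f = some lit) :
    pvVarNum (f.filter (fun cl => decide (lit ∉ cl))) < pvVarNum f := by
  obtain ⟨hin, hneg⟩ := pvPure_mem f lit h
  apply pvVarNum_lt _ f |lit|
  · intro x hx
    simp only [List.mem_flatMap, id] at hx
    obtain ⟨cl, hcl, hxcl⟩ := hx
    rw [List.mem_filter] at hcl
    obtain ⟨hclf, hkeep⟩ := hcl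
    have hmemf : x ∈ f.flatMap id := by
      simp only [List.mem_flatMap, id]; exact ⟨cl, hclf, hxcl⟩
    refine ⟨hmemf, fun hc => ?_⟩
    rcases abs_eq_abs.mp hc with heq | heq
    · exact absurd (heq ▸ hxcl) (by simpa using hkeep)
    · exact hneg (heq ▸ hmemf)
  · exact ⟨lit, hin, rfl⟩

-- the inner  while (lit := unit_literal(formula)) is not None:  loop of A
def unitLoop (f : List (List Int)) (asn : PySem.Dict Int Bool) (changed : Bool) :
    Option (List (List Int)) × PySem.Dict Int Bool × Bool :=
  match h : unitLiteral f with
  | none => (some f, asn, changed)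
  | some lit =>
    let asn' := asn.insert |lit| (decide (0 < lit))
    match h2 : propagate lit f with
    | none => (none, asn', changed)
    | some g => unitLoop g asn' true
termination_by pvVarNum f
decreasing_by exact pvVarNum_propagate_lt lit f g h2 (Or.inl (pvUnit_mem f lit h))

theorem pvUnitLoop_spec (f : List (List Int)) (asn : PySem.Dict Int Bool) (c : Bool)
    (f' : List (List Int)) (asn' : PySem.Dict Int Bool) (uc : Bool)
    (h : unitLoop f asn c = (some f', asn', uc)) :
    pvVarNum f' ≤ pvVarNum f ∧ unitLiteral f' = none ∧
      (uc = true → c = true ∨ pvVarNum f' < pvVarNum f) := by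
  revert h
  fun_induction unitLoop f asn c with
  | case1 f asn c hn =>
    intro h
    simp only [Prod.mk.injEq, Option.some.injEq] at h
    obtain ⟨rfl, rfl, rfl⟩ := h
    exact ⟨le_rfl, hn, fun h' => Or.inl h'⟩
  | case2 f asn c lit hu hp =>
    intro h
    simp at h
  | case3 f asn c lit hu asn2 g hp ih =>
    intro h
    obtain ⟨ihle, ihnone, ihuc⟩ := ih h
    have hlt := pvVarNum_propagate_lt _ f g hp (Or.inl (pvUnit_mem f _ hu))
    exact ⟨by omega, ihnone, fun _ => Or.inr (by omega)⟩

-- the  while changed:  loop of A (changed flag made an explicit parameter)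
def iterChanged (changed : Bool) (f : List (List Int)) (asn : PySem.Dict Int Bool) :
    Option (List (List Int)) × PySem.Dict Int Bool :=
  if changed then
    match h1 : unitLoop f asn false with
    | (none, asn', _) => (none, asn')
    | (some f', asn', uc) =>
      match h2 : pureLiteral f' with
      | some lit =>
        iterChanged true (f'.filter (fun cl => decide (lit ∉ cl))) (asn'.insert |lit| (decide (0 < lit)))
      | none => iterChanged uc f' asn'
  else (some f, asn)
termination_by 2 * pvVarNum f + changed.toNat
decreasing_by
  · have hle := (pvUnitLoop_spec f asn false f' asn' uc h1).1
    have hlt := pvVarNum_pureFilter_lt f' lit h2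
    rename_i hch
    simp only [hch, Bool.toNat_true]
    omega
  · obtain ⟨hle, -, huc⟩ := pvUnitLoop_spec f asn false f' asn' uc h1
    rename_i hch
    cases uc with
    | false => simp only [hch, Bool.toNat_true, Bool.toNat_false]; omega
    | true =>
      rcases huc rfl with hc | hlt
      · exact absurd hc (by simp)
      · simp only [hch, Bool.toNat_true]; omega

theorem pvIterChanged_le (c : Bool) (f : List (List Int)) (asn : PySem.Dict Int Bool)
    (f' : List (List Int)) (asn' : PySem.Dict Int Bool)
    (h : iterChanged c f asn = (some f', asn')) : pvVarNum f' ≤ pvVarNum f := by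
  revert h
  fun_induction iterChanged c f asn with
  | case1 f asn asn2 uc h1 =>
    intro h
    simp at h
  | case2 f asn fm asn2 uc h1 lit h2 ih =>
    intro h
    have hle := (pvUnitLoop_spec f asn false fm asn2 uc h1).1
    have hlt := pvVarNum_pureFilter_lt fm lit h2
    have := ih h
    omega
  | case3 f asn fm asn2 uc h1 h2 ih =>
    intro h
    have hle := (pvUnitLoop_spec f asn false fm asn2 uc h1).1
    have := ih h
    omega
  | case4 c f asn hc =>
    intro h
    simp only [Prod.mk.injEq, Option.some.injEq] at h
    obtain ⟨rfl, rfl⟩ := h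
    exact le_rfl

-- weight of a stack entry (3^(vars+1) so that two strictly smaller children weigh less)
def pvEW (e : Option (List (List Int)) × PySem.Dict Int Bool) : Nat :=
  match e.1 with
  | none => 1
  | some f => 3 ^ (pvVarNum f + 1)

theorem pvEW_child_le (f : List (List Int)) (l : Int) (d : PySem.Dict Int Bool)
    (hl : l ∈ f.flatMap id ∨ -l ∈ f.flatMap id) : pvEW (propagate l f, d) ≤ 3 ^ pvVarNum f := by
  cases h : propagate l f with
  | none => simpa [pvEW] using Nat.one_le_pow (pvVarNum f) 3 (by norm_num)
  | some g =>
    have := pvVarNum_propagate_lt l f g h hl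
    simp only [pvEW]
    exact Nat.pow_le_pow_right (by norm_num) (by omega)

-- simplify: unit propagation / pure-literal elimination to a fixpoint
def simplifyB (f : List (List Int)) : Option (List (List Int)) :=
  match h : unitLiteral f with
  | some lit =>
    match h2 : propagate lit f with
    | none => none
    | some g => simplifyB g
  | none =>
    match h3 : pureLiteral f with
    | some lit => simplifyB (f.filter (fun cl => decide (lit ∉ cl)))
    | none => some f
termination_by pvVarNum f
decreasing_by
  · exact pvVarNum_propagate_lt lit f g h2 (Or.inl (pvUnit_mem f lit h))
  · have key : (List.filter (fun (x : {cl // cl ∈ f}) => decide (lit ∉ (x : List Int))) f.attach).unattach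
        = f.filter (fun cl => decide (lit ∉ cl)) := by
      simp only [List.unattach]
      rw [show (fun (x : {cl // cl ∈ f}) => decide (lit ∉ (x : List Int)))
            = ((fun cl => decide (lit ∉ cl)) ∘ fun (x : {cl // cl ∈ f}) => (x : List Int)) from rfl,
          ← List.filter_map]
      simp
    rw [key]
    exact pvVarNum_pureFilter_lt f lit h3

-- the well-founded compilation of simplifyB presents its pure-literal argument through List.attach
theorem pvFilterAttach (f : List (List Int)) (lit : Int) :
    (List.filter (fun (x : {cl // cl ∈ f}) => decide (lit ∉ (x : List Int))) f.attach).unattach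
      = f.filter (fun cl => decide (lit ∉ cl)) := by
  simp only [List.unattach]
  rw [show (fun (x : {cl // cl ∈ f}) => decide (lit ∉ (x : List Int)))
        = ((fun cl => decide (lit ∉ cl)) ∘ fun (x : {cl // cl ∈ f}) => (x : List Int)) from rfl,
      ← List.filter_map]
  simp

theorem pvSimplify_le (f f' : List (List Int)) (h : simplifyB f = some f') :
    pvVarNum f' ≤ pvVarNum f := by
  revert h
  fun_induction simplifyB f with
  | case1 f lit hu hp =>
    intro h
    simp at h
  | case2 f lit hu g hp ih =>
    intro h
    have := ih h
    have hlt := pvVarNum_propagate_lt lit f g hp (Or.inl (pvUnit_mem f lit hu))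
    omega
  | case3 f hu lit hp ih =>
    intro h
    rw [pvFilterAttach f lit] at ih
    have := ih h
    have hlt := pvVarNum_pureFilter_lt f lit hp
    omega
  | case4 f hu hp =>
    intro h
    simp only [Option.some.injEq] at h
    exact h ▸ le_rfl

def pvOW : Option (List (List Int)) → Nat
  | none => 0
  | some f => pvVarNum f + 1

def dpllB (fOpt : Option (List (List Int))) : Bool :=
  match fOpt with
  | none => false
  | some f =>
    match h : simplifyB f with
    | none => false
    | some [] => true
    | some ([] :: _) => false  -- Python: IndexError (formula[0][0]); outside Pre_
    | some ((lit :: cl) :: rest) =>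
      dpllB (propagate lit ((lit :: cl) :: rest)) || dpllB (propagate (-lit) ((lit :: cl) :: rest))
termination_by pvOW fOpt
decreasing_by
  · have hle := pvSimplify_le f ((lit :: cl) :: rest) h
    have hmem : lit ∈ ((lit :: cl) :: rest).flatMap id := by
      simp only [List.mem_flatMap, id]
      exact ⟨_, List.mem_cons_self .., List.mem_cons_self ..⟩
    cases hp : propagate lit ((lit :: cl) :: rest) with
    | none => simp only [pvOW]; omega
    | some g =>
      have := pvVarNum_propagate_lt lit _ g hp (Or.inl hmem)
      simp only [pvOW, hp]; omega
  · have hle := pvSimplify_le f ((lit :: cl) :: rest) h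
    have hmem : lit ∈ ((lit :: cl) :: rest).flatMap id := by
      simp only [List.mem_flatMap, id]
      exact ⟨_, List.mem_cons_self .., List.mem_cons_self ..⟩
    cases hp : propagate (-lit) ((lit :: cl) :: rest) with
    | none => simp only [pvOW]; omega
    | some g =>
      have := pvVarNum_propagate_lt (-lit) _ g hp (Or.inr (by simpa using hmem))
      simp only [pvOW, hp]; omega

-- evaluation lemmas for the (dependent-match) equations of simplifyB and dpllB
theorem simplifyB_us_pn (f : List (List Int)) (lit : Int) (hu : unitLiteral f = some lit)
    (hp : propagate lit f = none) : simplifyB f = none := by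
  rw [simplifyB.eq_def]
  split
  · rename_i l heq
    rw [hu] at heq; cases heq
    split
    · rfl
    · rename_i g heq2; rw [hp] at heq2; cases heq2
  · rename_i heq; rw [hu] at heq; cases heq

theorem simplifyB_us_ps (f : List (List Int)) (lit : Int) (g : List (List Int))
    (hu : unitLiteral f = some lit) (hp : propagate lit f = some g) :
    simplifyB f = simplifyB g := by
  rw [simplifyB.eq_def]
  split
  · rename_i l heq
    rw [hu] at heq; cases heq
    split
    · rename_i heq2; rw [hp] at heq2; cases heq2
    · rename_i g2 heq2; rw [hp] at heq2; cases heq2; rfl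
  · rename_i heq; rw [hu] at heq; cases heq

theorem simplifyB_un_ps (f : List (List Int)) (lit : Int) (hn : unitLiteral f = none)
    (hp : pureLiteral f = some lit) :
    simplifyB f = simplifyB (f.filter (fun cl => decide (lit ∉ cl))) := by
  rw [simplifyB.eq_def]
  split
  · rename_i l heq; rw [hn] at heq; cases heq
  · split
    · rename_i l heq2; rw [hp] at heq2; cases heq2; rfl
    · rename_i heq2; rw [hp] at heq2; cases heq2

theorem simplifyB_un_pn (f : List (List Int)) (hn : unitLiteral f = none)
    (hp : pureLiteral f = none) : simplifyB f = some f := by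
  rw [simplifyB.eq_def]
  split
  · rename_i l heq; rw [hn] at heq; cases heq
  · split
    · rename_i l heq2; rw [hp] at heq2; cases heq2
    · rfl

theorem dpllB_none : dpllB none = false := by
  rw [dpllB.eq_def]

theorem dpllB_s_none (f : List (List Int)) (hs : simplifyB f = none) :
    dpllB (some f) = false := by
  rw [dpllB.eq_def]
  split
  · rename_i heq; cases heq
  · rename_i f2 heq; cases heq
    split <;> rename_i heq2 <;> rw [hs] at heq2 <;> cases heq2
    try rfl

theorem dpllB_s_nil (f : List (List Int)) (hs : simplifyB f = some []) :
    dpllB (some f) = true := by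
  rw [dpllB.eq_def]
  split
  · rename_i heq; cases heq
  · rename_i f2 heq; cases heq
    split <;> rename_i heq2 <;> rw [hs] at heq2 <;> cases heq2
    try rfl

theorem dpllB_s_emptyclause (f : List (List Int)) (t : List (List Int))
    (hs : simplifyB f = some ([] :: t)) : dpllB (some f) = false := by
  rw [dpllB.eq_def]
  split
  · rename_i heq; cases heq
  · rename_i f2 heq; cases heq
    split <;> rename_i heq2 <;> rw [hs] at heq2 <;> cases heq2
    try rfl

theorem dpllB_s_branch (f : List (List Int)) (lit : Int) (cl : List Int) (rest : List (List Int))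
    (hs : simplifyB f = some ((lit :: cl) :: rest)) :
    dpllB (some f) = (dpllB (propagate lit ((lit :: cl) :: rest)) ||
      dpllB (propagate (-lit) ((lit :: cl) :: rest))) := by
  rw [dpllB.eq_def]
  split
  · rename_i heq; cases heq
  · rename_i f2 heq; cases heq
    split <;> rename_i heq2 <;> rw [hs] at heq2 <;> cases heq2
    try rfl

-- A's unit-propagation loop computes the unit phase of B's simplify
theorem pvSimplify_unitLoop (f : List (List Int)) (asn : PySem.Dict Int Bool) (c : Bool) :
    simplifyB f = (match unitLoop f asn c with
      | (none, _, _) => none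
      | (some f', _, _) =>
        match pureLiteral f' with
        | some lit => simplifyB (f'.filter (fun cl => decide (lit ∉ cl)))
        | none => some f') := by
  fun_induction unitLoop f asn c with
  | case1 f asn c hn =>
    show simplifyB f = (match pureLiteral f with
      | some lit => simplifyB (f.filter (fun cl => decide (lit ∉ cl)))
      | none => some f)
    cases hpl : pureLiteral f with
    | none => rw [simplifyB_un_pn f hn hpl]
    | some lit => rw [simplifyB_un_ps f lit hn hpl]
  | case2 f asn c lit hu asnI hp =>
    show simplifyB f = none
    rw [simplifyB_us_pn f lit hu hp]
  | case3 f asn c lit hu asnI g hp ih =>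
    show simplifyB f = (match unitLoop g asnI true with
      | (none, _, _) => none
      | (some f', _, _) =>
        match pureLiteral f' with
        | some lit => simplifyB (f'.filter (fun cl => decide (lit ∉ cl)))
        | none => some f')
    rw [← ih, simplifyB_us_ps f lit g hu hp]

theorem pvSimplify_none (f : List (List Int)) (asn : PySem.Dict Int Bool) (c : Bool)
    (asn' : PySem.Dict Int Bool) (uc : Bool) (h : unitLoop f asn c = (none, asn', uc)) :
    simplifyB f = none := by
  rw [pvSimplify_unitLoop f asn c, h]

theorem pvSimplify_some (f : List (List Int)) (asn : PySem.Dict Int Bool) (c : Bool)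
    (f' : List (List Int)) (asn' : PySem.Dict Int Bool) (uc : Bool)
    (h : unitLoop f asn c = (some f', asn', uc)) :
    simplifyB f = (match pureLiteral f' with
      | some lit => simplifyB (f'.filter (fun cl => decide (lit ∉ cl)))
      | none => some f') := by
  rw [pvSimplify_unitLoop f asn c, h]

-- A's inner `while changed` loop computes exactly B's simplify
theorem pvIter_eq (c : Bool) (f : List (List Int)) (asn : PySem.Dict Int Bool) (hc : c = true) :
    (iterChanged c f asn).1 = simplifyB f := by
  revert hc
  fun_induction iterChanged c f asn with
  | case1 f asn asn2 uc h1 =>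
    intro _
    rw [pvSimplify_none f asn false asn2 uc h1]
  | case2 f asn fm asn2 uc h1 lit h2 ih =>
    intro _
    rw [ih rfl, pvSimplify_some f asn false fm asn2 uc h1, h2]
  | case3 f asn fm asn2 uc h1 h2 ih =>
    intro _
    have hnone := (pvUnitLoop_spec f asn false fm asn2 uc h1).2.1
    rw [pvSimplify_some f asn false fm asn2 uc h1, h2]
    cases uc with
    | true => rw [ih rfl, simplifyB_un_pn fm hnone h2]
    | false => rw [show iterChanged false fm asn2 = (some fm, asn2) from by
        rw [iterChanged.eq_def]; rfl]
  | case4 c f asn hch =>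
    intro hc
    exact absurd hc hch

-- ===== fuel-sufficiency bridges: each fueled port loop equals its well-founded reference =====

theorem unitLoop_un (f : List (List Int)) (asn : PySem.Dict Int Bool) (c : Bool)
    (hn : unitLiteral f = none) : unitLoop f asn c = (some f, asn, c) := by
  rw [unitLoop.eq_def]
  split
  · rfl
  · rename_i l heq; rw [hn] at heq; cases heq

theorem unitLoop_us_pn (f : List (List Int)) (asn : PySem.Dict Int Bool) (c : Bool) (lit : Int)
    (hu : unitLiteral f = some lit) (hp : propagate lit f = none) :
    unitLoop f asn c = (none, asn.insert |lit| (decide (0 < lit)), c) := by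
  rw [unitLoop.eq_def]
  split
  · rename_i heq; rw [hu] at heq; cases heq
  · rename_i l heq; rw [hu] at heq; cases heq
    split
    · rfl
    · rename_i g heq2; rw [hp] at heq2; cases heq2

theorem unitLoop_us_ps (f : List (List Int)) (asn : PySem.Dict Int Bool) (c : Bool) (lit : Int)
    (g : List (List Int)) (hu : unitLiteral f = some lit) (hp : propagate lit f = some g) :
    unitLoop f asn c = unitLoop g (asn.insert |lit| (decide (0 < lit))) true := by
  rw [unitLoop.eq_def]
  split
  · rename_i heq; rw [hu] at heq; cases heq
  · rename_i l heq; rw [hu] at heq; cases heq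
    split
    · rename_i heq2; rw [hp] at heq2; cases heq2
    · rename_i g2 heq2; rw [hp] at heq2; cases heq2; rfl

theorem unitLoopF_eq (n : Nat) : ∀ (f : List (List Int)) (asn : PySem.Dict Int Bool) (c : Bool),
    pvVarNum f < n → unitLoopF n f asn c = unitLoop f asn c := by
  induction n with
  | zero => intro f asn c h; omega
  | succ n ih =>
    intro f asn c _
    cases hu : unitLiteral f with
    | none =>
      simp only [unitLoopF, hu]
      rw [unitLoop_un f asn c hu]
    | some lit =>
      cases hp : propagate lit f with
      | none =>
        simp only [unitLoopF, hu, hp]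
        rw [unitLoop_us_pn f asn c lit hu hp]
      | some g =>
        have hlt := pvVarNum_propagate_lt lit f g hp (Or.inl (pvUnit_mem f lit hu))
        simp only [unitLoopF, hu, hp]
        rw [unitLoop_us_ps f asn c lit g hu hp]
        exact ih g _ true (by omega)

theorem iterChanged_false (f : List (List Int)) (asn : PySem.Dict Int Bool) :
    iterChanged false f asn = (some f, asn) := by
  rw [iterChanged.eq_def]; rfl

theorem iterChanged_un (f : List (List Int)) (asn asn' : PySem.Dict Int Bool) (uc : Bool)
    (h1 : unitLoop f asn false = (none, asn', uc)) :
    iterChanged true f asn = (none, asn') := by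
  rw [iterChanged.eq_def]
  simp only [if_true]
  split
  · rename_i heq; rw [h1] at heq; cases heq; rfl
  · rename_i f2 asn2 uc2 heq; rw [h1] at heq; cases heq

theorem iterChanged_pure (f : List (List Int)) (asn asn' : PySem.Dict Int Bool) (uc : Bool)
    (f' : List (List Int)) (lit : Int) (h1 : unitLoop f asn false = (some f', asn', uc))
    (h2 : pureLiteral f' = some lit) :
    iterChanged true f asn = iterChanged true (f'.filter (fun cl => decide (lit ∉ cl)))
      (asn'.insert |lit| (decide (0 < lit))) := by
  rw [iterChanged.eq_def]
  simp only [if_true]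
  split
  · rename_i heq; rw [h1] at heq; cases heq
  · rename_i f2 asn2 uc2 heq; rw [h1] at heq; cases heq
    split
    · rename_i l heq2; rw [h2] at heq2; cases heq2; rfl
    · rename_i heq2; rw [h2] at heq2; cases heq2

theorem iterChanged_nopure (f : List (List Int)) (asn asn' : PySem.Dict Int Bool) (uc : Bool)
    (f' : List (List Int)) (h1 : unitLoop f asn false = (some f', asn', uc))
    (h2 : pureLiteral f' = none) :
    iterChanged true f asn = iterChanged uc f' asn' := by
  rw [iterChanged.eq_def]
  simp only [if_true]
  split
  · rename_i heq; rw [h1] at heq; cases heq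
  · rename_i f2 asn2 uc2 heq; rw [h1] at heq; cases heq
    split
    · rename_i l heq2; rw [h2] at heq2; cases heq2
    · rfl

theorem iterChangedF_eq (n : Nat) : ∀ (c : Bool) (f : List (List Int)) (asn : PySem.Dict Int Bool),
    2 * pvVarNum f + c.toNat < n → iterChangedF n c f asn = iterChanged c f asn := by
  induction n with
  | zero => intro c f asn h; omega
  | succ n ih =>
    intro c f asn hfuel
    cases c with
    | false => rw [iterChangedF, if_neg (by simp), iterChanged_false]
    | true =>
      simp only [Bool.toNat_true] at hfuel
      cases h1 : unitLoop f asn false with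
      | mk r s =>
        obtain ⟨asn2, uc⟩ := s
        cases r with
        | none =>
          simp only [iterChangedF, if_pos,
            unitLoopF_eq (pvVarNum f + 1) f asn false (by omega), h1]
          rw [iterChanged_un f asn asn2 uc h1]
        | some f' =>
          obtain ⟨hle, -, huc⟩ := pvUnitLoop_spec f asn false f' asn2 uc h1
          cases h2 : pureLiteral f' with
          | some lit =>
            have hlt := pvVarNum_pureFilter_lt f' lit h2
            simp only [iterChangedF, if_pos,
              unitLoopF_eq (pvVarNum f + 1) f asn false (by omega), h1, h2]
            rw [iterChanged_pure f asn asn2 uc f' lit h1 h2]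
            exact ih true _ _ (by simp only [Bool.toNat_true]; omega)
          | none =>
            simp only [iterChangedF, if_pos,
              unitLoopF_eq (pvVarNum f + 1) f asn false (by omega), h1, h2]
            rw [iterChanged_nopure f asn asn2 uc f' h1 h2]
            cases uc with
            | false => exact ih false f' asn2 (by simp only [Bool.toNat_false]; omega)
            | true =>
              rcases huc rfl with hc | hlt
              · cases hc
              · exact ih true f' asn2 (by simp only [Bool.toNat_true]; omega)

theorem simplifyBF_eq (n : Nat) : ∀ (f : List (List Int)),
    pvVarNum f < n → simplifyBF n f = simplifyB f := by
  induction n with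
  | zero => intro f h; omega
  | succ n ih =>
    intro f _
    cases hu : unitLiteral f with
    | some lit =>
      cases hp : propagate lit f with
      | none =>
        simp only [simplifyBF, hu, hp]
        rw [simplifyB_us_pn f lit hu hp]
      | some g =>
        have hlt := pvVarNum_propagate_lt lit f g hp (Or.inl (pvUnit_mem f lit hu))
        simp only [simplifyBF, hu, hp]
        rw [simplifyB_us_ps f lit g hu hp]
        exact ih g (by omega)
    | none =>
      cases hp : pureLiteral f with
      | some lit =>
        have hlt := pvVarNum_pureFilter_lt f lit hp
        simp only [simplifyBF, hu, hp]
        rw [simplifyB_un_ps f lit hu hp]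
        exact ih _ (by omega)
      | none =>
        simp only [simplifyBF, hu, hp]
        rw [simplifyB_un_pn f hu hp]

theorem dpllBF_eq (n : Nat) : ∀ (fOpt : Option (List (List Int))),
    pvOW fOpt ≤ n → dpllBF n fOpt = dpllB fOpt := by
  induction n with
  | zero =>
    intro fOpt h
    cases fOpt with
    | none => rw [dpllBF, dpllB_none]
    | some f => simp [pvOW] at h
  | succ n ih =>
    intro fOpt hfuel
    cases fOpt with
    | none => simp only [dpllBF]; rw [dpllB_none]
    | some f =>
      simp only [pvOW] at hfuel
      cases hs : simplifyB f with
      | none =>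
        simp only [dpllBF, simplifyBF_eq (pvVarNum f + 1) f (by omega), hs]
        rw [dpllB_s_none f hs]
      | some f' =>
        have hle := pvSimplify_le f f' hs
        match f' with
        | [] =>
          simp only [dpllBF, simplifyBF_eq (pvVarNum f + 1) f (by omega), hs]
          rw [dpllB_s_nil f hs]
        | [] :: t =>
          simp only [dpllBF, simplifyBF_eq (pvVarNum f + 1) f (by omega), hs]
          rw [dpllB_s_emptyclause f t hs]
        | (lit :: cl) :: rest =>
          simp only [dpllBF, simplifyBF_eq (pvVarNum f + 1) f (by omega), hs]
          rw [dpllB_s_branch f lit cl rest hs]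
          have hmem : lit ∈ ((lit :: cl) :: rest).flatMap id := by
            simp only [List.mem_flatMap, id]
            exact ⟨_, List.mem_cons_self .., List.mem_cons_self ..⟩
          have hbound : ∀ l : Int, (l ∈ ((lit :: cl) :: rest).flatMap id ∨
              -l ∈ ((lit :: cl) :: rest).flatMap id) →
              pvOW (propagate l ((lit :: cl) :: rest)) ≤ n := by
            intro l hl
            cases hp : propagate l ((lit :: cl) :: rest) with
            | none => simp only [pvOW]; omega
            | some g =>
              have := pvVarNum_propagate_lt l _ g hp hl
              simp only [pvOW]; omega
          rw [ih _ (hbound lit (Or.inl hmem)), ih _ (hbound (-lit) (Or.inr (by simpa using hmem)))]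

theorem aLoopF_any (n : Nat) : ∀ (stack : List (Option (List (List Int)) × PySem.Dict Int Bool)),
    (stack.map pvEW).sum ≤ n → aLoopF n stack = stack.any (fun e => dpllB e.1) := by
  induction n with
  | zero =>
    intro stack h
    cases stack with
    | nil => rfl
    | cons e rest =>
      exfalso
      have h1 : 1 ≤ pvEW e := by
        obtain ⟨fOpt, asn⟩ := e
        cases fOpt with
        | none => simp [pvEW]
        | some f => simpa [pvEW] using Nat.one_le_pow (pvVarNum f + 1) 3 (by norm_num)
      simp only [List.map_cons, List.sum_cons] at h
      omega
  | succ n ih =>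
    intro stack hfuel
    cases stack with
    | nil => rfl
    | cons e rest =>
      obtain ⟨fOpt, asn⟩ := e
      simp only [List.map_cons, List.sum_cons] at hfuel
      cases fOpt with
      | none =>
        simp only [aLoopF]
        rw [ih rest (by simp only [pvEW] at hfuel; omega), List.any_cons, dpllB_none]
        simp
      | some f =>
        have hW : pvEW (some f, asn) = 3 ^ (pvVarNum f + 1) := rfl
        rw [hW] at hfuel
        have hpos : 0 < (3:Nat) ^ (pvVarNum f + 1) := by positivity
        cases hI : iterChanged true f asn with
        | mk r asn' =>
          cases r with
          | none =>
            have hs : simplifyB f = none := by rw [← pvIter_eq true f asn rfl, hI]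
            simp only [aLoopF, iterChangedF_eq (2 * pvVarNum f + 2) true f asn (by simp), hI]
            rw [ih rest (by omega), List.any_cons, dpllB_s_none f hs]
            simp
          | some f' =>
            have hs : simplifyB f = some f' := by rw [← pvIter_eq true f asn rfl, hI]
            match f' with
            | [] =>
              simp only [aLoopF, iterChangedF_eq (2 * pvVarNum f + 2) true f asn (by simp), hI]
              rw [List.any_cons, dpllB_s_nil f hs]
              simp
            | [] :: t =>
              simp only [aLoopF, iterChangedF_eq (2 * pvVarNum f + 2) true f asn (by simp), hI]
              rw [ih rest (by omega), List.any_cons, dpllB_s_emptyclause f t hs]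
              simp
            | (lit :: cl) :: tl =>
              simp only [aLoopF, iterChangedF_eq (2 * pvVarNum f + 2) true f asn (by simp), hI]
              have hle : pvVarNum ((lit :: cl) :: tl) ≤ pvVarNum f :=
                pvIterChanged_le true f asn _ asn' hI
              have hmem : lit ∈ ((lit :: cl) :: tl).flatMap id := by
                simp only [List.mem_flatMap, id]
                exact ⟨_, List.mem_cons_self .., List.mem_cons_self ..⟩
              have h1 := pvEW_child_le ((lit :: cl) :: tl) lit
                (asn'.insert |lit| (decide (0 < lit))) (Or.inl hmem)
              have h2 := pvEW_child_le ((lit :: cl) :: tl) (-lit)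
                (asn'.insert |lit| (decide (lit < 0))) (Or.inr (by simpa using hmem))
              have hp1 : (3:Nat) ^ pvVarNum ((lit :: cl) :: tl) ≤ 3 ^ pvVarNum f :=
                Nat.pow_le_pow_right (by norm_num) hle
              have hp2 : (3:Nat) ^ (pvVarNum f + 1) = 3 * 3 ^ pvVarNum f := by
                rw [Nat.pow_succ, Nat.mul_comm]
              have hpos2 : 0 < (3:Nat) ^ pvVarNum f := by positivity
              rw [ih ((propagate lit ((lit :: cl) :: tl), asn'.insert |lit| (decide (0 < lit))) ::
                    (propagate (-lit) ((lit :: cl) :: tl), asn'.insert |lit| (decide (lit < 0))) :: rest)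
                  (by simp only [List.map_cons, List.sum_cons]; omega)]
              simp only [List.any_cons]
              rw [dpllB_s_branch f lit cl tl hs, Bool.or_assoc]

-- ===== VERDICT (by name: the statement is the Claim_ definition above) =====
theorem dpll_iterative_spec : Claim_equal_dpll_iterative := by
  intro clauses _ _
  unfold Spec_dpll_iterative dpll_iterative dpll_iterative_alt
  rw [aLoopF_any (3 ^ (pvVarNum clauses + 1)) [(some clauses, PySem.Dict.empty)]
      (by simp only [List.map_cons, List.map_nil, List.sum_cons, List.sum_nil]; simp [pvEW]),
    dpllBF_eq (pvVarNum clauses + 1) (some clauses) (by simp [pvOW])]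
  simp [List.any]
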